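-- pv_equiv track=rewrite | github.com/ISP-SST/sst_archive | ingestion/utils/generate_sparse_list_string.py | generate_sparse_list_string
-- ===== SOURCE A (Python) =====
-- def _write_elements_to_string(output_string, range_start, range_end):
--     if output_string:
--         output_string += ','
--
--     if range_start == range_end:
--         # Write a single item.
--         output_string += '%s' % (str(range_end))
--     else:
--         # Write a range.
--         output_string += '%s-%s' % (str(range_start), str(range_end))
--
--     return output_string
--
-- def generate_sparse_list_string(items):
--     """
--     Assumes a sorted list of items that support addition, comparison and conversion to strings.
--     """
--     sparse_list_string = ''
--
--     range_start = None
--     last_item = None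
--
--     for i in items:
--         if range_start is None:
--             range_start = i
--
--         if last_item is not None and i != last_item + 1:
--             sparse_list_string = _write_elements_to_string(sparse_list_string, range_start, last_item)
--             range_start = i
--
--         last_item = i
--
--     # Add the last range or single item.
--     sparse_list_string = _write_elements_to_string(sparse_list_string, range_start, last_item)
--
--     return sparse_list_string
-- ===== SOURCE B (Python) =====
-- def generate_sparse_list_string(items):
--     """
--     Assumes a sorted list of items that support addition, comparison and conversion to strings.
--     """
--     parts = []
--     n = len(items)
--     i = 0
--     while i < n:
--         start = items[i]
--         j = i + 1
--         while j < n and items[j] == items[j - 1] + 1: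
--             j += 1
--         end = items[j - 1]
--         parts.append(str(end) if start == end else '%s-%s' % (start, end))
--         i = j
--     return ','.join(parts)
-- ===== Notes on version B (the rewrite author's own statement) =====
-- stated objective: faster
-- what changed: B replaces A's flat scan with range_start/last_item sentinel state writing into a growing string by a nested two-pointer scan that extracts each maximal consecutive run [i,j) directly, formats it, and joins the chunks once.
-- intended difference: On the empty list A returns the string 'None' (str(None) applied to its never-set sentinels) while B returns '', the natural join of zero chunks, which is the intended representation of no items. — e.g. on generate_sparse_list_string([]): A returns "None", B returns ""
import Mathlib
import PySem

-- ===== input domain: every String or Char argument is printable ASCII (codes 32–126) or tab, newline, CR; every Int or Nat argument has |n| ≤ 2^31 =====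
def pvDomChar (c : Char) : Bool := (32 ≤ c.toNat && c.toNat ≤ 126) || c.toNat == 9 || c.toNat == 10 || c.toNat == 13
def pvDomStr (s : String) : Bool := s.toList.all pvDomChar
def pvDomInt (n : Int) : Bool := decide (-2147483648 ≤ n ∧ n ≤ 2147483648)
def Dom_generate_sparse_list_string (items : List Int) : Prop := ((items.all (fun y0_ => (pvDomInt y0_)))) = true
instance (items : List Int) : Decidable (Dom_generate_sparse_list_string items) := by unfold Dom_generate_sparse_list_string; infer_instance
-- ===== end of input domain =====

-- B extracts maximal consecutive runs with a nested two-pointer scan and joins the formatted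
-- chunks once, instead of A's flat scan over sentinel state writing into a growing string;
-- on the empty list A returns "None" and B returns "" (stated as D_ below).

-- ===== PORT A =====
-- str(x) where x is the Python variable holding an int or None
def pvFmtO : Option Int → String
  | some n => PySem.Int.toStr n
  | none => "None"

def pvWriteElems (output_string : String) (range_start range_end : Option Int) : String :=
  let output_string := if output_string == "" then output_string else output_string ++ ","
  if range_start == range_end then output_string ++ pvFmtO range_end
  else output_string ++ pvFmtO range_start ++ "-" ++ pvFmtO range_end

def pvStepA (st : String × Option Int × Option Int) (i : Int) : String × Option Int × Option Int :=
  match st with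
  | (s, rs0, last) =>
    let rs := if rs0.isNone then some i else rs0
    match last with
    | some l =>
      if i ≠ l + 1 then (pvWriteElems s rs (some l), some i, some i)
      else (s, rs, some i)
    | none => (s, rs, some i)

def generate_sparse_list_string (items : List Int) : String :=
  let st := items.foldl pvStepA ("", none, none)
  pvWriteElems st.1 st.2.1 st.2.2

-- ===== PORT B =====
-- inner two-pointer scan: advance j while items[j] == items[j-1] + 1; returns (end, rest)
def pvRun : Int → List Int → Int × List Int
  | prev, [] => (prev, [])
  | prev, x :: xs => if x = prev + 1 then pvRun x xs else (prev, x :: xs)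

lemma pvRun_len (p : Int) (xs : List Int) : (pvRun p xs).2.length ≤ xs.length := by
  induction xs generalizing p with
  | nil => simp [pvRun]
  | cons x xs ih =>
    simp only [pvRun]
    split
    · exact le_trans (ih x) (Nat.le_succ _)
    · simp

-- outer loop: chunk the list into maximal consecutive runs (start, end)
def pvChunks : List Int → List (Int × Int)
  | [] => []
  | x :: xs =>
    (x, (pvRun x xs).1) :: pvChunks (pvRun x xs).2
termination_by l => l.length
decreasing_by exact Nat.lt_succ_of_le (pvRun_len x xs)

-- str(end) if start == end else '%s-%s' % (start, end)
def pvFmtChunk (c : Int × Int) : String :=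
  if c.1 == c.2 then PySem.Int.toStr c.2
  else PySem.Int.toStr c.1 ++ "-" ++ PySem.Int.toStr c.2

def generate_sparse_list_string_alt (items : List Int) : String :=
  PySem.Str.join "," ((pvChunks items).map pvFmtChunk)

-- ===== PRECONDITION & SPEC =====
-- On the empty list A returns "None" (str(None) on its never-set sentinels) while B returns "",
-- the natural join of zero chunks, which is the intended representation of no items.
def D_generate_sparse_list_string (items : List Int) : Prop := items = []
instance (items : List Int) : Decidable (D_generate_sparse_list_string items) := by unfold D_generate_sparse_list_string; infer_instance

def Spec_generate_sparse_list_string (items : List Int) (out : String) : Prop := ¬ D_generate_sparse_list_string items → out = generate_sparse_list_string_alt items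
instance (items : List Int) (out : String) : Decidable (Spec_generate_sparse_list_string items out) := by unfold Spec_generate_sparse_list_string; infer_instance

def pvDiffWitness_generate_sparse_list_string : List Int := []
def pvDiffWitnessOut_generate_sparse_list_string : String × String := ("None", "")

-- ===== CLAIM (what is proved, stated in full; the proofs are below) =====
def Claim_unchanged_generate_sparse_list_string : Prop := ∀ (items : List Int), Dom_generate_sparse_list_string items → Spec_generate_sparse_list_string items (generate_sparse_list_string items)
def Claim_changed_generate_sparse_list_string : Prop := Dom_generate_sparse_list_string (pvDiffWitness_generate_sparse_list_string) ∧ D_generate_sparse_list_string (pvDiffWitness_generate_sparse_list_string) ∧ generate_sparse_list_string (pvDiffWitness_generate_sparse_list_string) = pvDiffWitnessOut_generate_sparse_list_string.1 ∧ generate_sparse_list_string_alt (pvDiffWitness_generate_sparse_list_string) = pvDiffWitnessOut_generate_sparse_list_string.2 ∧ pvDiffWitnessOut_generate_sparse_list_string.1 ≠ pvDiffWitnessOut_generate_sparse_list_string.2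
def Claim_exact_generate_sparse_list_string : Prop := ∀ (items : List Int), Dom_generate_sparse_list_string items → D_generate_sparse_list_string items → generate_sparse_list_string items ≠ generate_sparse_list_string_alt items

-- ===== LEMMAS AND PROOFS =====

-- join abbreviation and group formatting over Option pairs (proof-side only)
def pvFmtGroup (g : Option Int × Option Int) : String :=
  if g.1 == g.2 then pvFmtO g.2 else pvFmtO g.1 ++ "-" ++ pvFmtO g.2

def pvJ (gs : List (Option Int × Option Int)) : String :=
  PySem.Str.join "," (gs.map pvFmtGroup)

lemma pvFmtO_toList_ne_nil (o : Option Int) : (pvFmtO o).toList ≠ [] := by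
  cases o with
  | none => simp [pvFmtO]
  | some n =>
    simp only [pvFmtO, PySem.Int.toList_toStr, PySem.Int.toChars]
    split
    · simp
    · have := @Nat.length_toDigits_pos 10 n.toNat
      intro h; simp [h] at this

lemma pvFmtGroup_toList_ne_nil (g : Option Int × Option Int) : (pvFmtGroup g).toList ≠ [] := by
  unfold pvFmtGroup
  split
  · exact pvFmtO_toList_ne_nil _
  · intro h
    simp only [String.toList_append] at h
    rcases List.append_eq_nil_iff.1 h with ⟨h1, -⟩
    rcases List.append_eq_nil_iff.1 h1 with ⟨h2, -⟩
    exact pvFmtO_toList_ne_nil _ h2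

lemma pvJ_nil : pvJ [] = "" := by
  have : (pvJ []).toList = ("" : String).toList := by
    simp [pvJ, PySem.Str.toList_join, PySem.Chars.join_nil]
  have := congrArg String.ofList this
  simpa [String.ofList_toList] using this

lemma pvJ_eq_empty_iff (gs : List (Option Int × Option Int)) : pvJ gs = "" ↔ gs = [] := by
  constructor
  · intro h
    cases gs with
    | nil => rfl
    | cons g rest =>
      exfalso
      have ht : (pvJ (g :: rest)).toList = [] := by rw [h]; rfl
      simp only [pvJ, PySem.Str.toList_join, List.map_cons, List.map_map] at ht
      cases rest with
      | nil =>
        rw [show List.map (String.toList ∘ pvFmtGroup) ([] : List (Option Int × Option Int)) = [] from rfl,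
            PySem.Chars.join_singleton] at ht
        exact pvFmtGroup_toList_ne_nil g ht
      | cons q r =>
        rw [List.map_cons, PySem.Chars.join_cons_cons] at ht
        rcases List.append_eq_nil_iff.1 ht with ⟨h1, -⟩
        rcases List.append_eq_nil_iff.1 h1 with ⟨h2, -⟩
        exact pvFmtGroup_toList_ne_nil g h2
  · intro h; subst h; exact pvJ_nil

lemma pvStr_ext {s t : String} (h : s.toList = t.toList) : s = t := by
  have h1 := congrArg String.ofList h
  simpa [String.ofList_toList] using h1

lemma pvChars_join_snoc (sep p q : List Char) (ps : List (List Char)) :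
    PySem.Chars.join sep (p :: ps ++ [q]) = PySem.Chars.join sep (p :: ps) ++ sep ++ q := by
  induction ps generalizing p with
  | nil => simp [PySem.Chars.join_cons_cons, PySem.Chars.join_singleton]
  | cons r rs ih =>
    show PySem.Chars.join sep (p :: r :: (rs ++ [q])) = _
    rw [PySem.Chars.join_cons_cons,
        show PySem.Chars.join sep (r :: (rs ++ [q])) = PySem.Chars.join sep (r :: rs) ++ sep ++ q
          from ih r,
        PySem.Chars.join_cons_cons]
    simp [List.append_assoc]

lemma pvJ_snoc (gs : List (Option Int × Option Int)) (g : Option Int × Option Int) :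
    pvJ (gs ++ [g]) = if gs = [] then pvFmtGroup g else pvJ gs ++ "," ++ pvFmtGroup g := by
  cases gs with
  | nil =>
    simp only [List.nil_append]
    apply pvStr_ext
    simp [pvJ, PySem.Str.toList_join, PySem.Chars.join_singleton]
  | cons x rest =>
    rw [if_neg (by simp : ¬(x :: rest = []))]
    apply pvStr_ext
    simp only [pvJ, PySem.Str.toList_join, String.toList_append, List.map_append, List.map_cons,
      List.map_nil, List.cons_append]
    exact pvChars_join_snoc _ _ _ _

lemma pvWrite_join (gs : List (Option Int × Option Int)) (g : Option Int × Option Int) :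
    pvWriteElems (pvJ gs) g.1 g.2 = pvJ (gs ++ [g]) := by
  unfold pvWriteElems
  rw [pvJ_snoc]
  by_cases hgs : gs = []
  · subst hgs
    rw [pvJ_nil]
    simp [pvFmtGroup]
  · have hne : pvJ gs ≠ "" := fun h => hgs ((pvJ_eq_empty_iff gs).1 h)
    have hb : (pvJ gs == "") = false := beq_eq_false_iff_ne.2 hne
    simp only [hb, if_neg hgs, Bool.false_eq_true, if_false, pvFmtGroup]
    split
    · rfl
    · simp [String.append_assoc]

def pvFin (st : String × Option Int × Option Int) : String :=
  pvWriteElems st.1 st.2.1 st.2.2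

def pvWriteChunk (a : String) (c : Int × Int) : String :=
  pvWriteElems a (some c.1) (some c.2)

-- A's loop consumes exactly the run pvRun finds, without writing, then writes once
lemma pvRun_spec (xs : List Int) : ∀ (prev st : Int) (s : String),
    List.foldl pvStepA (s, some st, some prev) xs =
      match pvRun prev xs with
      | (e, []) => (s, some st, some e)
      | (e, y :: r) =>
          List.foldl pvStepA (pvWriteElems s (some st) (some e), some y, some y) r := by
  induction xs with
  | nil => intro prev st s; simp [pvRun]
  | cons x xs ih =>
    intro prev st s
    by_cases hx : x = prev + 1
    · have hA : pvStepA (s, some st, some prev) x = (s, some st, some x) := by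
        simp [pvStepA, hx]
      rw [List.foldl_cons, hA, show pvRun prev (x :: xs) = pvRun x xs by simp [pvRun, hx]]
      exact ih x st s
    · have hA : pvStepA (s, some st, some prev) x =
          (pvWriteElems s (some st) (some prev), some x, some x) := by
        simp [pvStepA, hx]
      rw [List.foldl_cons, hA, show pvRun prev (x :: xs) = (prev, x :: xs) by simp [pvRun, hx]]

lemma pvFin_chunks : ∀ (n : Nat) (xs : List Int), xs.length ≤ n → ∀ (x : Int) (s : String),
    pvFin (List.foldl pvStepA (s, some x, some x) xs) =
      List.foldl pvWriteChunk s (pvChunks (x :: xs)) := by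
  intro n
  induction n with
  | zero =>
    intro xs h x s
    have hx : xs = [] := List.length_eq_zero_iff.1 (Nat.le_zero.1 h)
    subst hx
    simp [pvChunks, pvRun, pvFin, pvWriteChunk]
  | succ n ih =>
    intro xs h x s
    have hc : pvChunks (x :: xs) = (x, (pvRun x xs).1) :: pvChunks (pvRun x xs).2 := by
      rw [pvChunks]
    rw [pvRun_spec xs x x s]
    rcases hR : pvRun x xs with ⟨e, r⟩
    rw [hR] at hc
    cases r with
    | nil =>
      simp only [hc]
      simp [pvChunks, pvFin, pvWriteChunk]
    | cons y r' =>
      have hlen : r'.length ≤ n := by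
        have := pvRun_len x xs
        rw [hR] at this
        simp only [List.length_cons] at this
        omega
      simp only []
      rw [ih r' hlen y (pvWriteElems s (some x) (some e)), hc]
      have hc2 : pvChunks (y :: r') = (y, (pvRun y r').1) :: pvChunks (pvRun y r').2 := by
        rw [pvChunks]
      simp [pvWriteChunk]

lemma pvFmtGroup_some (c : Int × Int) :
    pvFmtGroup (some c.1, some c.2) = pvFmtChunk c := by
  simp [pvFmtGroup, pvFmtChunk, pvFmtO]

lemma pvFoldl_chunks_join (cs : List (Int × Int)) :
    ∀ gs, List.foldl pvWriteChunk (pvJ gs) cs =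
      pvJ (gs ++ cs.map (fun c => (some c.1, some c.2))) := by
  induction cs with
  | nil => intro gs; simp
  | cons c cs ih =>
    intro gs
    rw [List.foldl_cons, show pvWriteChunk (pvJ gs) c = pvJ (gs ++ [(some c.1, some c.2)]) from
      pvWrite_join gs (some c.1, some c.2), ih]
    simp

-- ===== VERDICT (by name: the statement is the Claim_ definition above) =====
theorem generate_sparse_list_string_spec : Claim_unchanged_generate_sparse_list_string := by
  intro items _ hD
  cases items with
  | nil => exact absurd rfl hD
  | cons x xs =>
    unfold generate_sparse_list_string generate_sparse_list_string_alt
    have h1 : pvStepA ("", none, none) x = ("", some x, some x) := by simp [pvStepA]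
    show pvFin (List.foldl pvStepA ("", none, none) (x :: xs)) = _
    rw [List.foldl_cons, h1, pvFin_chunks xs.length xs le_rfl x ""]
    rw [show ("" : String) = pvJ [] from pvJ_nil.symm, pvFoldl_chunks_join]
    simp only [List.nil_append]
    unfold pvJ
    rw [List.map_map]
    exact congrArg (PySem.Str.join ",") (List.map_congr_left fun c _ => pvFmtGroup_some c)

lemma pvAlt_nil : generate_sparse_list_string_alt [] = "" := by
  unfold generate_sparse_list_string_alt
  rw [show pvChunks ([] : List Int) = [] from by rw [pvChunks]]
  simpa [pvJ] using pvJ_nil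

theorem generate_sparse_list_string_changed : Claim_changed_generate_sparse_list_string := by
  unfold Claim_changed_generate_sparse_list_string
  exact ⟨by decide, rfl, by decide, pvAlt_nil, by decide⟩

theorem generate_sparse_list_string_tight : Claim_exact_generate_sparse_list_string := by
  intro items _ hD
  subst hD
  rw [pvAlt_nil]
  decide
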